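-- pv_equiv track=rewrite | github.com/cloud99277/Z-Core | zcore/engines/ghost_agent.py | _tail_with_anchor
-- ===== SOURCE A (Python) =====
-- def _tail_with_anchor(prompt: str, tail_chars: int) -> str:
--     start = max(len(prompt) - tail_chars, 0)
--     for _ in range(2):
--         boundary = prompt.rfind("\n", 0, start)
--         if boundary == -1:
--             return prompt
--         start = boundary
--     return prompt[start + 1 :]
-- ===== SOURCE B (Python) =====
-- def _tail_with_anchor(prompt: str, tail_chars: int) -> str:
--     start = max(len(prompt) - tail_chars, 0)
--     nl = [i for i, ch in enumerate(prompt[:start]) if ch == "\n"]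
--     if len(nl) < 2:
--         return prompt
--     return prompt[nl[-2] + 1:]
-- ===== Notes on version B (the rewrite author's own statement) =====
-- stated objective: alternative
-- what changed: Replaces A's two targeted backward rfind scans (with early returns) by one forward pass that collects every newline position in the prefix prompt[:start] into an index list and slices after the second-to-last entry.
import Mathlib
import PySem

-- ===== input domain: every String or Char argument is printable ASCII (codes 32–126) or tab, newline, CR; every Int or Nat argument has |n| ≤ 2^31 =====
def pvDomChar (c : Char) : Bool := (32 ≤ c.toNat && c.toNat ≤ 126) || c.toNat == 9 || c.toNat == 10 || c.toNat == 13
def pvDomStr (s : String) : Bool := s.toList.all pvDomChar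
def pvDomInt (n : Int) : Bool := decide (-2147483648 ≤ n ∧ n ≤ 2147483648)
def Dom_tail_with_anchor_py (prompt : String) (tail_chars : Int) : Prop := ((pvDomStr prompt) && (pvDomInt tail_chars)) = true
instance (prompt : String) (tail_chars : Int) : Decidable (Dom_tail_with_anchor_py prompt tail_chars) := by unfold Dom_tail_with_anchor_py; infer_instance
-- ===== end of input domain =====

-- B replaces A's two backward rfind scans by one forward pass collecting all newline
-- positions of the prefix and slicing after the second-to-last; same cost, different strategy.

-- ===== PORT A =====
-- the 'for _ in range(2)' loop with its early return and the final slice after the loop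
def tailAnchorLoopA (prompt : String) (start : Int) : Nat → String
  | 0 => PySem.Str.slice prompt (some (start + 1)) none          -- return prompt[start + 1:]
  | n + 1 =>
    let boundary := PySem.Str.rfindFrom prompt "\n" 0 (some start)  -- prompt.rfind("\n", 0, start)
    if boundary = -1 then prompt else tailAnchorLoopA prompt boundary n

def tail_with_anchor_py (prompt : String) (tail_chars : Int) : String :=
  let start := max ((PySem.Str.len prompt : Int) - tail_chars) 0
  tailAnchorLoopA prompt start 2

-- ===== PORT B =====
def tail_with_anchor_py_alt (prompt : String) (tail_chars : Int) : String :=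
  let start := max ((PySem.Str.len prompt : Int) - tail_chars) 0
  let nl := ((PySem.List.enumerate (PySem.Str.slice prompt none (some start)).toList 0).filter
      (fun p => p.2 == '\n')).map Prod.fst
  if nl.length < 2 then prompt
  else PySem.Str.slice prompt (some (PySem.List.pyGetD nl (-2) 0 + 1)) none

-- ===== PRECONDITION & SPEC =====
def Spec_tail_with_anchor_py (prompt : String) (tail_chars : Int) (out : String) : Prop := out = tail_with_anchor_py_alt prompt tail_chars
instance (prompt : String) (tail_chars : Int) (out : String) : Decidable (Spec_tail_with_anchor_py prompt tail_chars out) := by unfold Spec_tail_with_anchor_py; infer_instance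

-- ===== CLAIM (what is proved, stated in full; the proofs are below) =====
def Claim_equal_tail_with_anchor_py : Prop := ∀ (prompt : String) (tail_chars : Int), Dom_tail_with_anchor_py prompt tail_chars → Spec_tail_with_anchor_py prompt tail_chars (tail_with_anchor_py prompt tail_chars)

-- ===== LEMMAS AND PROOFS =====

def nlHits : List Char → Nat → List Nat
  | [], _ => []
  | c :: l, i => if c = '\n' then i :: nlHits l (i + 1) else nlHits l (i + 1)
theorem nlHits_lb (l : List Char) (i : Nat) : ∀ j ∈ nlHits l i, i ≤ j := by
  induction l generalizing i with
  | nil => simp [nlHits]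
  | cons c l ih =>
    intro j hj
    simp only [nlHits] at hj
    split at hj
    · rcases List.mem_cons.1 hj with h | h
      · omega
      · have := ih (i + 1) j h; omega
    · have := ih (i + 1) j hj; omega

theorem nlHits_ub (l : List Char) (i : Nat) : ∀ j ∈ nlHits l i, j < i + l.length := by
  induction l generalizing i with
  | nil => simp [nlHits]
  | cons c l ih =>
    intro j hj
    simp only [nlHits] at hj
    split at hj
    · rcases List.mem_cons.1 hj with h | h
      · simp [h]
      · have := ih (i + 1) j h; simp at *; omega
    · have := ih (i + 1) j hj; simp at *; omega

theorem nlHits_pairwise (l : List Char) (i : Nat) : (nlHits l i).Pairwise (· < ·) := by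
  induction l generalizing i with
  | nil => simp [nlHits]
  | cons c l ih =>
    simp only [nlHits]
    split
    · exact List.pairwise_cons.2 ⟨fun j hj => by have := nlHits_lb l (i+1) j hj; omega, ih (i+1)⟩
    · exact ih (i + 1)

theorem nlHits_take (l : List Char) (m i : Nat) :
    nlHits (l.take m) i = (nlHits l i).filter (fun j => j < i + m) := by
  induction l generalizing m i with
  | nil => simp [nlHits]
  | cons c l ih =>
    cases m with
    | zero =>
      simp only [List.take_zero, nlHits]
      have : ∀ j ∈ nlHits (c :: l) i, ¬ (j < i + 0) := by
        intro j hj; have := nlHits_lb (c :: l) i j hj; omega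
      rw [List.filter_eq_nil_iff.2 (by intro j hj; simpa using this j hj)]
    | succ m =>
      simp only [List.take_succ_cons, nlHits]
      split
      · rw [ih]
        simp only [List.filter_cons, decide_eq_true_eq]
        rw [if_pos (by omega)]
        congr 1
        apply List.filter_congr
        intro j hj
        simp only [decide_eq_decide]
        omega
      · rw [ih]
        apply List.filter_congr
        intro j hj
        simp only [decide_eq_decide]
        omega

theorem nlHits_shift (l : List Char) (i : Nat) :
    nlHits l i = (nlHits l 0).map (fun j => i + j) := by
  induction l generalizing i with
  | nil => simp [nlHits]
  | cons c l ih =>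
    simp only [nlHits]
    split
    · rw [ih (i+1), ih 1]
      simp [List.map_map]
    · rw [ih (i+1), ih 1]
      simp [List.map_map]
theorem enum_filter_eq_nlHits (l : List Char) (s : Int) :
    ((PySem.List.enumerate l s).filter (fun p => p.2 == '\n')).map Prod.fst
      = (nlHits l 0).map (fun (j : Nat) => s + (j : Int)) := by
  induction l generalizing s with
  | nil => simp [PySem.List.enumerate_nil, nlHits]
  | cons c l ih =>
    rw [PySem.List.enumerate_cons]
    simp only [List.filter_cons, nlHits]
    by_cases hc : c = '\n'
    · subst hc
      rw [if_pos rfl, show (('\n' : Char) == '\n') = true from by decide]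
      simp only [List.map_cons, nlHits_shift l 1, List.map_map]
      refine List.cons_eq_cons.2 ⟨by omega, ?_⟩
      rw [ih (s+1)]
      apply List.map_congr_left; intro j hj; simp only [Function.comp]; push_cast; ring
    · rw [show (c == '\n') = false from by simpa using hc, if_neg hc]
      rw [if_neg (by simp), ih (s+1), nlHits_shift l 1, List.map_map]
      apply List.map_congr_left; intro j hj; simp only [Function.comp]; push_cast; ring

theorem nlHits_append (a b : List Char) (i : Nat) :
    nlHits (a ++ b) i = nlHits a i ++ nlHits b (i + a.length) := by
  induction a generalizing i with
  | nil => simp [nlHits]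
  | cons c a ih =>
    simp only [List.cons_append, nlHits, ih]
    split <;> simp <;> ring_nf

theorem singleton_isPrefixOf (l : List Char) (j : Nat) :
    (['\n'].isPrefixOf (l.drop j)) = (l[j]? == some '\n') := by
  by_cases h : j < l.length
  · rw [List.drop_eq_getElem_cons h]
    simp [List.isPrefixOf, List.getElem?_eq_getElem h, eq_comm]
  · rw [List.drop_of_length_le (by omega), List.getElem?_eq_none (by omega)]
    simp [List.isPrefixOf]

theorem rfind_go_spec (l : List Char) (k : Nat) :
    PySem.Chars.rfind.go l ['\n'] k =
      match (nlHits (l.take (k + 1)) 0).getLast? with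
      | some j => (j : Int)
      | none => -1 := by
  induction k with
  | zero =>
    show (if ['\n'].isPrefixOf (l.drop 0) then (0:Int) else -1) = _
    rw [singleton_isPrefixOf]
    cases l with
    | nil => simp [nlHits]
    | cons c l' =>
      by_cases hc : c = '\n'
      · subst hc; simp [nlHits]
      · simp [nlHits, hc]
  | succ k ih =>
    show (if ['\n'].isPrefixOf (l.drop (k+1)) then ((k:Int)+1) else PySem.Chars.rfind.go l ['\n'] k) = _
    rw [singleton_isPrefixOf]
    cases h : l[k+1]? with
    | none =>
      have hlen : l.length ≤ k + 1 := by
        by_contra hx; rw [List.getElem?_eq_getElem (by omega)] at h; simp at h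
      rw [List.take_of_length_le (by omega)] at ih ⊢
      simpa using ih
    | some c =>
      have hk : k + 1 < l.length := by
        by_contra hx; rw [List.getElem?_eq_none (by omega)] at h; simp at h
      have htake : l.take (k+2) = l.take (k+1) ++ [c] := by
        rw [List.take_add_one, h]; rfl
      rw [htake, nlHits_append]
      have hlen1 : (l.take (k+1)).length = k + 1 := by simp; omega
      by_cases hc : c = '\n'
      · subst hc
        simp only [nlHits, hlen1]
        simp
      · have : nlHits [c] (0 + (l.take (k+1)).length) = [] := by simp [nlHits, hc]
        rw [this, List.append_nil, ih]
        simp [hc]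

theorem rfind_eq_nlHits (l : List Char) :
    PySem.Chars.rfind l ['\n'] =
      match (nlHits l 0).getLast? with
      | some j => (j : Int)
      | none => -1 := by
  show PySem.Chars.rfind.go l ['\n'] l.length = _
  rw [rfind_go_spec, List.take_of_length_le (by omega)]

theorem filter_lt_getLast (L : List Nat) (a : Nat) (hs : L.Pairwise (· < ·))
    (hl : L.getLast? = some a) : L.filter (fun j => j < a) = L.dropLast := by
  rcases List.getLast?_eq_some_iff.1 hl with ⟨L', rfl⟩
  rw [List.dropLast_concat, List.filter_append]
  have h1 : L'.filter (fun j => decide (j < a)) = L' := by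
    apply List.filter_eq_self.2
    intro j hj
    have := (List.pairwise_append.1 (by simpa using hs)).2.2 j hj a (by simp)
    simpa using this
  simp [h1]

theorem rfindFrom_zero_some (cs : List Char) (e : Int) (he : 0 ≤ e) :
    PySem.Chars.rfindFrom cs ['\n'] 0 (some e) =
      match (nlHits (cs.take e.toNat) 0).getLast? with
      | some j => (j : Int)
      | none => -1 := by
  simp only [PySem.Chars.rfindFrom]
  norm_num
  by_cases hne : (cs.length : Int) < e
  · simp only [if_pos hne, if_neg (show ¬ ((cs.length : Int)) < 0 from by omega),
      Int.toNat_natCast, List.take_length, List.take_of_length_le (show cs.length ≤ e.toNat from by omega),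
      rfind_eq_nlHits]
    cases h : (nlHits cs 0).getLast? with
    | none => simp
    | some j => rw [if_neg (show ¬ ((j:Int)) = -1 from by omega)]
  · simp only [if_neg hne, if_neg (show ¬ e < 0 from by omega), rfind_eq_nlHits]
    cases h : (nlHits (cs.take e.toNat) 0).getLast? with
    | none => simp
    | some j => rw [if_neg (show ¬ ((j:Int)) = -1 from by omega)]

-- ===== VERDICT (by name: the statement is the Claim_ definition above) =====
theorem tail_with_anchor_py_spec : Claim_equal_tail_with_anchor_py := by
  intro prompt t _
  show tail_with_anchor_py prompt t = tail_with_anchor_py_alt prompt t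
  set st0 : Int := max (PySem.Str.len prompt - t) 0 with hst0
  have h0 : 0 ≤ st0 := le_max_right _ _
  set cs : List Char := prompt.toList with hcs
  set l : List Char := cs.take st0.toNat with hl
  set H : List Nat := nlHits l 0 with hH
  -- the prefix list B scans
  have hslice : (PySem.Str.slice prompt none (some st0)).toList = l := by
    rw [PySem.Str.toList_slice, PySem.Chars.slice_eq_listSlice]
    simp only [PySem.List.slice, PySem.List.clampIdx, if_neg (show ¬ st0 < 0 from by omega),
      List.drop_zero, Nat.sub_zero]
    rw [hl, ← List.take_take, List.take_length]
  -- B's comprehension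
  have hB : tail_with_anchor_py_alt prompt t =
      (if (H.map (fun j : Nat => (j : Int))).length < 2 then prompt
       else PySem.Str.slice prompt
         (some (PySem.List.pyGetD (H.map (fun j : Nat => (j : Int))) (-2) 0 + 1)) none) := by
    show (if (((PySem.List.enumerate (PySem.Str.slice prompt none (some st0)).toList 0).filter
        (fun p => p.2 == '\n')).map Prod.fst).length < 2 then prompt
      else PySem.Str.slice prompt
        (some (PySem.List.pyGetD (((PySem.List.enumerate
          (PySem.Str.slice prompt none (some st0)).toList 0).filter
          (fun p => p.2 == '\n')).map Prod.fst) (-2) 0 + 1)) none) = _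
    rw [hslice, enum_filter_eq_nlHits l 0, ← hH,
      List.map_congr_left (fun (j : Nat) (_ : j ∈ H) => by simp :
        ∀ j ∈ H, (fun (j : Nat) => (0 : Int) + (j : Int)) j = (fun (j : Nat) => (j : Int)) j)]
  -- A's first rfind
  have hrf1 : PySem.Str.rfindFrom prompt "\n" 0 (some st0) =
      (match H.getLast? with | some j => (j : Int) | none => -1) := by
    rw [PySem.Str.rfindFrom_eq]
    show PySem.Chars.rfindFrom cs ['\n'] 0 (some st0) = _
    rw [rfindFrom_zero_some cs st0 h0, ← hl, ← hH]
  have step2 : tail_with_anchor_py prompt t =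
      (if PySem.Str.rfindFrom prompt "\n" 0 (some st0) = -1 then prompt
       else tailAnchorLoopA prompt (PySem.Str.rfindFrom prompt "\n" 0 (some st0)) 1) := rfl
  have step1 : ∀ s : Int, tailAnchorLoopA prompt s 1 =
      (if PySem.Str.rfindFrom prompt "\n" 0 (some s) = -1 then prompt
       else PySem.Str.slice prompt (some (PySem.Str.rfindFrom prompt "\n" 0 (some s) + 1)) none) :=
    fun s => rfl
  cases h1 : H.getLast? with
  | none =>
    have hnil : H = [] := List.getLast?_eq_none_iff.1 h1
    rw [step2, hrf1, h1, if_pos rfl, hB, hnil]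
    simp
  | some a =>
    have hmem : a ∈ H := by
      rcases List.getLast?_eq_some_iff.1 h1 with ⟨H', hH'⟩
      rw [hH']; simp
    have haub : a < l.length := by have := nlHits_ub l 0 a hmem; omega
    have hal : a ≤ st0.toNat := by
      have : l.length ≤ st0.toNat := by rw [hl]; simp
      omega
    have htake : cs.take a = l.take a := by
      rw [hl, List.take_take, min_eq_left hal]
    -- A's second rfind finds the second-to-last newline
    have hrf2 : PySem.Str.rfindFrom prompt "\n" 0 (some (a : Int)) =
        (match H.dropLast.getLast? with | some j => (j : Int) | none => -1) := by
      rw [PySem.Str.rfindFrom_eq]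
      show PySem.Chars.rfindFrom cs ['\n'] 0 (some (a : Int)) = _
      rw [rfindFrom_zero_some cs (a : Int) (by omega), Int.toNat_natCast, htake,
        nlHits_take l a 0, ← hH,
        List.filter_congr (fun (j : Nat) (_ : j ∈ H) => by simp :
          ∀ j ∈ H, (decide (j < 0 + a)) = (decide (j < a))),
        filter_lt_getLast H a (hH ▸ nlHits_pairwise l 0) h1]
    rw [step2, hrf1, h1]
    rw [if_neg (show ¬ ((a : Int)) = -1 from by omega), step1, hrf2]
    cases h2 : H.dropLast.getLast? with
    | none =>
      have hdnil : H.dropLast = [] := List.getLast?_eq_none_iff.1 h2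
      have hlen1 : H.length ≤ 1 := by
        have hld : H.dropLast.length = H.length - 1 := List.length_dropLast
        rw [hdnil] at hld
        simp at hld
        omega
      rw [if_pos rfl, hB, if_pos (by simp; omega)]
    | some b =>
      have hlen2 : 2 ≤ H.length := by
        have hne : H.dropLast ≠ [] := by
          intro hx; rw [hx] at h2; simp at h2
        have hld : H.dropLast.length = H.length - 1 := List.length_dropLast
        have hpos : 1 ≤ H.dropLast.length := List.length_pos_iff.2 hne
        omega
      have hb : H[H.length - 2]? = some b := by
        rw [List.getLast?_eq_getElem?, List.length_dropLast, List.getElem?_dropLast,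
          Nat.sub_sub] at h2
        rw [if_pos (by omega)] at h2
        exact h2
      have hidx : PySem.List.pyGetD (H.map (fun j : Nat => (j : Int))) (-2) 0 = (b : Int) := by
        simp only [PySem.List.pyGetD, PySem.List.pyGet?, PySem.List.pyIdx?, List.length_map]
        rw [if_neg (by omega), if_pos (show -(H.length : Int) ≤ -2 from by omega)]
        simp only [Option.bind_some, List.getElem?_map]
        rw [show (-(-2 : Int)).toNat = 2 from rfl, hb]
        rfl
      rw [if_neg (show ¬ ((b : Int)) = -1 from by omega), hB,
        if_neg (by simpa using by omega), hidx]
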